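-- pv_equiv track=rewrite | github.com/tunayildizuzh/ComputationalThinking | genedots.py | dots
-- ===== SOURCE A (Python) =====
-- def dots(str1, str2, window):
--     results = []
--     x_vals = []
--     y_vals = []
--     for i,x in enumerate(str1):
--         for j,y in enumerate(str2):
--             string1 = list(str1[i:i+window])
--             string2 = list(str2[j:j+window])
--             if len(string1) < window:
--                 continue
--             if len(string2) < window:
--                 continue
--
--             if string1 == string2:
--                 results.append(string1)
--                 x_vals.append(i)
--                 y_vals.append(j)
--
--     return results , x_vals, y_vals
-- ===== SOURCE B (Python) =====
-- def dots(str1, str2, window):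
--     # Index every full-length window of str2 by its text, once.
--     index = {}
--     for j in range(len(str2)):
--         sub = str2[j:j+window]
--         if len(sub) >= window:
--             index.setdefault(sub, []).append(j)
--     results = []
--     x_vals = []
--     y_vals = []
--     for i in range(len(str1)):
--         sub = str1[i:i+window]
--         if len(sub) >= window:
--             for j in index.get(sub, []):
--                 results.append(list(sub))
--                 x_vals.append(i)
--                 y_vals.append(j)
--     return results, x_vals, y_vals
-- ===== Notes on version B (the rewrite author's own statement) =====
-- stated objective: alternative
-- what changed: B builds a dict index from each full window of str2 to its list of positions in one pass, then for each window of str1 looks the substring up once, replacing A's nested loops that re-slice and compare str2 at every (i,j) pair; on match-dense (duplicate-heavy) inputs both are bound by the output size, so no speed-up is claimed.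
import Mathlib
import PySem

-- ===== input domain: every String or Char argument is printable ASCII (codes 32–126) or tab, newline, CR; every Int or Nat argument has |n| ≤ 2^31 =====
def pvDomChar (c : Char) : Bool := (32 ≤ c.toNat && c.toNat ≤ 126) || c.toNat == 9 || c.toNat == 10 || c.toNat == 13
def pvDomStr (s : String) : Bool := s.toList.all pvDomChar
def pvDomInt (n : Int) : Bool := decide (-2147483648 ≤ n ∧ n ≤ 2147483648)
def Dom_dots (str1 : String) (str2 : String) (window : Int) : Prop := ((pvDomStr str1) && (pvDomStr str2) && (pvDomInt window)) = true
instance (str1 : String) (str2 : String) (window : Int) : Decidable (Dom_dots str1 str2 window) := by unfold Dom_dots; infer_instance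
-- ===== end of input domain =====

-- B replaces A's triple loop (re-slicing str2 for every (i,j)) by a one-pass dict index
-- of str2's windows, looked up once per window of str1 (alternative algorithm, same value).

-- list(s) for a Python string s: the list of its one-character strings
def pyChars (cs : List Char) : List String := cs.map (fun c => String.ofList [c])

-- ===== PORT A =====
def dots (str1 : String) (str2 : String) (window : Int) : List (List String) × List Int × List Int :=
  let s1 := str1.toList
  let s2 := str2.toList
  (PySem.List.enumerate s1 0).foldl
    (fun (acc : List (List String) × List Int × List Int) ix =>
      (PySem.List.enumerate s2 0).foldl
        (fun acc2 jy =>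
          let string1 := pyChars (PySem.List.slice s1 (some ix.1) (some (ix.1 + window)))
          let string2 := pyChars (PySem.List.slice s2 (some jy.1) (some (jy.1 + window)))
          if (string1.length : Int) < window then acc2
          else if (string2.length : Int) < window then acc2
          else if string1 = string2 then
            (acc2.1 ++ [string1], acc2.2.1 ++ [ix.1], acc2.2.2 ++ [jy.1])
          else acc2)
        acc)
    ([], [], [])

-- ===== PORT B =====
-- index = {}; for j in range(len(str2)): sub = str2[j:j+window]; if len(sub) >= window: index.setdefault(sub, []).append(j)
def dotsIndex (s2 : List Char) (window : Int) : PySem.Dict (List Char) (List Int) :=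
  (PySem.List.pyRange 0 (s2.length : Int) 1).foldl
    (fun d j =>
      let sub := PySem.List.slice s2 (some j) (some (j + window))
      if window ≤ (sub.length : Int) then d.modify sub [] (fun js => js ++ [j]) else d)
    PySem.Dict.empty

def dots_alt (str1 : String) (str2 : String) (window : Int) : List (List String) × List Int × List Int :=
  let s1 := str1.toList
  let s2 := str2.toList
  let index := dotsIndex s2 window
  (PySem.List.pyRange 0 (s1.length : Int) 1).foldl
    (fun (acc : List (List String) × List Int × List Int) i =>
      let sub := PySem.List.slice s1 (some i) (some (i + window))
      if window ≤ (sub.length : Int) then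
        (index.getD sub []).foldl
          (fun acc2 j => (acc2.1 ++ [pyChars sub], acc2.2.1 ++ [i], acc2.2.2 ++ [j]))
          acc
      else acc)
    ([], [], [])

-- ===== PRECONDITION & SPEC =====
def Spec_dots (str1 : String) (str2 : String) (window : Int) (out : List (List String) × List Int × List Int) : Prop := out = dots_alt str1 str2 window
instance (str1 : String) (str2 : String) (window : Int) (out : List (List String) × List Int × List Int) : Decidable (Spec_dots str1 str2 window out) := by unfold Spec_dots; infer_instance

-- ===== CLAIM (what is proved, stated in full; the proofs are below) =====
def Claim_equal_dots : Prop := ∀ (str1 : String) (str2 : String) (window : Int), Dom_dots str1 str2 window → Spec_dots str1 str2 window (dots str1 str2 window)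

-- ===== LEMMAS AND PROOFS =====

-- the accumulator triple (results, x_vals, y_vals)
abbrev DotsAcc := List (List String) × List Int × List Int

theorem foldl_const {α β : Type} (l : List β) (a : α) :
    l.foldl (fun acc _ => acc) a = a := by
  induction l generalizing a with
  | nil => rfl
  | cons x xs ih => exact ih a

theorem pyChars_inj {xs ys : List Char} : pyChars xs = pyChars ys ↔ xs = ys := by
  unfold pyChars
  constructor
  · intro h
    refine List.map_injective_iff.mpr (fun a b hab => ?_) h
    have := congrArg String.toList hab
    simpa using this
  · intro h; rw [h]

@[simp] theorem pyChars_length (xs : List Char) : (pyChars xs).length = xs.length := by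
  simp [pyChars]

-- appending a match triple for every j in js
theorem foldl_triple (js : List Int) (v : List String) (i : Int) (acc : DotsAcc) :
    js.foldl (fun acc2 j => (acc2.1 ++ [v], acc2.2.1 ++ [i], acc2.2.2 ++ [j])) acc
      = (acc.1 ++ js.map (fun _ => v), acc.2.1 ++ js.map (fun _ => i), acc.2.2 ++ js) := by
  induction js generalizing acc with
  | nil => simp
  | cons j rest ih => simp [List.foldl_cons, ih]

-- guarded version: append the triple only when p j holds
theorem foldl_triple_if (js : List Int) (p : Int → Prop) [DecidablePred p]
    (v : List String) (i : Int) (acc : DotsAcc) :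
    js.foldl (fun acc2 j => if p j then (acc2.1 ++ [v], acc2.2.1 ++ [i], acc2.2.2 ++ [j]) else acc2) acc
      = (acc.1 ++ (js.filter (fun j => decide (p j))).map (fun _ => v),
         acc.2.1 ++ (js.filter (fun j => decide (p j))).map (fun _ => i),
         acc.2.2 ++ js.filter (fun j => decide (p j))) := by
  induction js generalizing acc with
  | nil => simp
  | cons j rest ih =>
    by_cases hj : p j
    · simp [List.foldl_cons, hj, ih]
    · simp [List.foldl_cons, hj, ih]

-- what the one-pass dict build of B returns for any key
theorem dotsIndex_fold_getD (s2 : List Char) (window : Int) (js : List Int)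
    (d : PySem.Dict (List Char) (List Int)) (s : List Char) :
    ((js.foldl (fun d j =>
        if window ≤ ((PySem.List.slice s2 (some j) (some (j + window))).length : Int) then
          d.modify (PySem.List.slice s2 (some j) (some (j + window))) [] (fun l => l ++ [j])
        else d) d).getD s [])
      = d.getD s [] ++ js.filter (fun j =>
          decide (window ≤ ((PySem.List.slice s2 (some j) (some (j + window))).length : Int)
            ∧ PySem.List.slice s2 (some j) (some (j + window)) = s)) := by
  induction js generalizing d with
  | nil => simp
  | cons j rest ih =>
    simp only [List.foldl_cons, List.filter_cons]
    by_cases hlen : window ≤ ((PySem.List.slice s2 (some j) (some (j + window))).length : Int)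
    · rw [if_pos hlen, ih, PySem.Dict.getD_modify]
      by_cases hs : PySem.List.slice s2 (some j) (some (j + window)) = s
      · rw [if_pos hs.symm, hs]
        have hlen' : window ≤ (s.length : Int) := hs ▸ hlen
        simp [hlen', List.append_assoc]
      · rw [if_neg (fun h => hs h.symm)]
        simp [hs]
    · rw [if_neg hlen, ih]
      simp [hlen]

theorem dotsIndex_getD (s2 : List Char) (window : Int) (s : List Char) :
    (dotsIndex s2 window).getD s []
      = (PySem.List.pyRange 0 (s2.length : Int) 1).filter (fun j =>
          decide (window ≤ ((PySem.List.slice s2 (some j) (some (j + window))).length : Int)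
            ∧ PySem.List.slice s2 (some j) (some (j + window)) = s)) := by
  unfold dotsIndex
  show (((PySem.List.pyRange 0 (s2.length : Int) 1).foldl (fun d j =>
        if window ≤ ((PySem.List.slice s2 (some j) (some (j + window))).length : Int) then
          d.modify (PySem.List.slice s2 (some j) (some (j + window))) [] (fun l => l ++ [j])
        else d) PySem.Dict.empty).getD s []) = _
  rw [dotsIndex_fold_getD]
  simp

-- a fold over enumerate(xs) whose body only uses the index is a fold over range(len(xs))
theorem foldl_enum_fst {α P : Type} (xs : List α) (F : P → Int → P) (init : P) :
    (PySem.List.enumerate xs 0).foldl (fun a x => F a x.1) init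
      = (PySem.List.pyRange 0 (xs.length : Int) 1).foldl F init := by
  have h := List.foldl_map (f := fun x : Int × α => x.1) (g := F)
    (l := PySem.List.enumerate xs 0) (init := init)
  rw [← h, PySem.List.map_fst_enumerate]
  norm_num

-- A's inner-loop body, as a function of the index j only
def innerA (s1 s2 : List Char) (w : Int) (i : Int) (acc2 : DotsAcc) (j : Int) : DotsAcc :=
  if ((pyChars (PySem.List.slice s1 (some i) (some (i + w)))).length : Int) < w then acc2
  else if ((pyChars (PySem.List.slice s2 (some j) (some (j + w)))).length : Int) < w then acc2
  else if pyChars (PySem.List.slice s1 (some i) (some (i + w)))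
          = pyChars (PySem.List.slice s2 (some j) (some (j + w))) then
    (acc2.1 ++ [pyChars (PySem.List.slice s1 (some i) (some (i + w)))], acc2.2.1 ++ [i], acc2.2.2 ++ [j])
  else acc2

-- A's outer-loop body, as a function of the index i only
def stepA (s1 s2 : List Char) (w : Int) (acc : DotsAcc) (i : Int) : DotsAcc :=
  (PySem.List.enumerate s2 0).foldl (fun a jy => innerA s1 s2 w i a jy.1) acc

-- B's outer-loop body
def stepB (s1 s2 : List Char) (w : Int) (acc : DotsAcc) (i : Int) : DotsAcc :=
  let sub := PySem.List.slice s1 (some i) (some (i + w))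
  if w ≤ (sub.length : Int) then
    ((dotsIndex s2 w).getD sub []).foldl
      (fun acc2 j => (acc2.1 ++ [pyChars sub], acc2.2.1 ++ [i], acc2.2.2 ++ [j])) acc
  else acc

theorem innerA_skip (s1 s2 : List Char) (w i : Int)
    (h : ¬ w ≤ ((PySem.List.slice s1 (some i) (some (i + w))).length : Int))
    (a : DotsAcc) (j : Int) : innerA s1 s2 w i a j = a := by
  unfold innerA
  rw [if_pos (show ((pyChars (PySem.List.slice s1 (some i) (some (i + w)))).length : Int) < w by
    simp only [pyChars_length]; omega)]

theorem innerA_if (s1 s2 : List Char) (w i : Int)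
    (h : w ≤ ((PySem.List.slice s1 (some i) (some (i + w))).length : Int))
    (a : DotsAcc) (j : Int) :
    innerA s1 s2 w i a j =
      if (w ≤ ((PySem.List.slice s2 (some j) (some (j + w))).length : Int)
          ∧ PySem.List.slice s2 (some j) (some (j + w)) = PySem.List.slice s1 (some i) (some (i + w))) then
        (a.1 ++ [pyChars (PySem.List.slice s1 (some i) (some (i + w)))], a.2.1 ++ [i], a.2.2 ++ [j])
      else a := by
  unfold innerA
  rw [if_neg (show ¬ ((pyChars (PySem.List.slice s1 (some i) (some (i + w)))).length : Int) < w by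
    simp only [pyChars_length]; omega)]
  by_cases h2 : ((PySem.List.slice s2 (some j) (some (j + w))).length : Int) < w
  · rw [if_pos (show ((pyChars (PySem.List.slice s2 (some j) (some (j + w)))).length : Int) < w by
      simp only [pyChars_length]; exact h2)]
    have hnc : ¬ (w ≤ ((PySem.List.slice s2 (some j) (some (j + w))).length : Int)
        ∧ PySem.List.slice s2 (some j) (some (j + w)) = PySem.List.slice s1 (some i) (some (i + w))) :=
      fun hc => absurd hc.1 (by omega)
    rw [if_neg hnc]
  · rw [if_neg (show ¬ ((pyChars (PySem.List.slice s2 (some j) (some (j + w)))).length : Int) < w by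
      simp only [pyChars_length]; exact h2)]
    by_cases h3 : PySem.List.slice s2 (some j) (some (j + w)) = PySem.List.slice s1 (some i) (some (i + w))
    · rw [if_pos (pyChars_inj.mpr h3.symm), if_pos ⟨by omega, h3⟩]
    · rw [if_neg (fun hc => h3 (pyChars_inj.mp hc).symm), if_neg (fun hc => h3 hc.2)]

theorem stepA_eq_stepB (s1 s2 : List Char) (w : Int) (acc : DotsAcc) (i : Int) :
    stepA s1 s2 w acc i = stepB s1 s2 w acc i := by
  unfold stepA stepB
  rw [foldl_enum_fst s2 (innerA s1 s2 w i) acc]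
  by_cases h : w ≤ ((PySem.List.slice s1 (some i) (some (i + w))).length : Int)
  · rw [if_pos h, dotsIndex_getD, foldl_triple,
      PySem.List.foldl_congr_mem _ _ (g := fun a j =>
        if (w ≤ ((PySem.List.slice s2 (some j) (some (j + w))).length : Int)
            ∧ PySem.List.slice s2 (some j) (some (j + w)) = PySem.List.slice s1 (some i) (some (i + w))) then
          (a.1 ++ [pyChars (PySem.List.slice s1 (some i) (some (i + w)))], a.2.1 ++ [i], a.2.2 ++ [j])
        else a) _ (fun a j _ => innerA_if s1 s2 w i h a j),
      foldl_triple_if]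
  · rw [if_neg h,
      PySem.List.foldl_congr_mem _ _ (g := fun a _ => a) _ (fun a j _ => innerA_skip s1 s2 w i h a j),
      foldl_const]

-- ===== VERDICT (by name: the statement is the Claim_ definition above) =====
theorem dots_spec : Claim_equal_dots := by
  intro str1 str2 window _
  unfold Spec_dots dots dots_alt
  show (PySem.List.enumerate str1.toList 0).foldl
      (fun acc ix => stepA str1.toList str2.toList window acc ix.1) ([], [], []) = _
  rw [foldl_enum_fst str1.toList (stepA str1.toList str2.toList window) ([], [], []),
    PySem.List.foldl_congr_mem _ _ (g := stepB str1.toList str2.toList window) _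
      (fun a i _ => stepA_eq_stepB str1.toList str2.toList window a i)]
  rfl
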